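-- pv_equiv track=rewrite | github.com/haxr369/lizohadaBackEnd | EC2/PreferenceInference/preference_inference.py | get_keywords_by_region
-- ===== SOURCE A (Python) =====
-- def get_keywords_by_region(items):
--     """
--     DB에서 가져온 항목들(list)를 region이 같은 것들끼리 묶어서 dictionary 형태로 변환하는 함수
--     """
--     keywords_by_region = {}
--     for item in items:
--         region = item['region']
--         keyword = item['keyword']
--         if region in keywords_by_region:
--             keywords_by_region[region].append(keyword)
--         else:
--             keywords_by_region[region] = [keyword]
--     return keywords_by_region
-- ===== SOURCE B (Python) =====
-- def get_keywords_by_region(items):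
--     """
--     Two-phase regrouping: first collect the distinct regions in first-appearance
--     order, then build each region's keyword list with a comprehension over items.
--     """
--     regions = []
--     for it in items:
--         r = it['region']
--         if r not in regions:
--             regions.append(r)
--     return {r: [it['keyword'] for it in items if it['region'] == r] for r in regions}
-- ===== Notes on version B (the rewrite author's own statement) =====
-- stated objective: alternative
-- what changed: Replaces the single-pass dict accumulation (append-or-create per item) with a two-phase scheme: one pass collecting the distinct regions in first-appearance order, then a comprehension per region re-scanning items to build its keyword list.
import Mathlib
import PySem

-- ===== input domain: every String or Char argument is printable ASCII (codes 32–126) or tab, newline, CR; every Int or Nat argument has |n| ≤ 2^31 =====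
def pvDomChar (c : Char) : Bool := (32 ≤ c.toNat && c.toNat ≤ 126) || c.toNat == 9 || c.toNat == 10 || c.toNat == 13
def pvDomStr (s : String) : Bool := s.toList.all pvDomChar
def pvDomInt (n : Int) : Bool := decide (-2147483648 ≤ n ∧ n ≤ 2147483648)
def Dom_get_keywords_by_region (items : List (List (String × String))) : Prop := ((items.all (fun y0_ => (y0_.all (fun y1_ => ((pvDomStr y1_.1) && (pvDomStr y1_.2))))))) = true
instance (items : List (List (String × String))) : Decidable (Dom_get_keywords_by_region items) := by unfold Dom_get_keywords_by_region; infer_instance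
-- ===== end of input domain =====

-- B replaces A's single-pass dict accumulation by a two-phase regrouping (distinct regions first,
-- then one items-scan per region); same return value, no speed claim.


-- item['region'] / item['keyword'] (Pre_ guarantees the key is present, so the default is never returned)
def pvItemGet (it : List (String × String)) (key : String) : String :=
  (PySem.Dict.mk it).getD key ""

-- ===== PORT A =====
-- for item in items: append to the existing group or create a new one, in a dict
def get_keywords_by_region (items : List (List (String × String))) : List (String × List String) :=
  (items.foldl
    (fun d it =>
      let region := pvItemGet it "region"
      let keyword := pvItemGet it "keyword"
      if d.contains region then d.modify region [] (fun l => l ++ [keyword])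
      else d.insert region [keyword])
    PySem.Dict.empty).items

-- ===== PORT B =====
-- distinct regions in first-appearance order, then one comprehension per region
def get_keywords_by_region_alt (items : List (List (String × String))) : List (String × List String) :=
  let regions : PySem.Set String :=
    items.foldl (fun rs it => PySem.Set.add rs (pvItemGet it "region")) PySem.Set.empty
  regions.map (fun r =>
    (r, (items.filter (fun it => pvItemGet it "region" == r)).map (fun it => pvItemGet it "keyword")))

-- ===== PRECONDITION & SPEC =====
-- Pre_ excludes exactly the inputs on which the Python A raises KeyError: an item without a
-- 'region' or 'keyword' key (B raises there too).
def Pre_get_keywords_by_region (items : List (List (String × String))) : Prop :=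
  (items.all (fun it => (PySem.Dict.mk it).contains "region" && (PySem.Dict.mk it).contains "keyword")) = true
instance (items : List (List (String × String))) : Decidable (Pre_get_keywords_by_region items) := by
  unfold Pre_get_keywords_by_region; infer_instance

def pvWitness_get_keywords_by_region : (List (List (String × String))) :=
  [[("region", "seoul"), ("keyword", "food")], [("region", "busan"), ("keyword", "sea")],
   [("region", "seoul"), ("keyword", "park")]]

def Spec_get_keywords_by_region (items : List (List (String × String))) (out : List (String × List String)) : Prop := out = get_keywords_by_region_alt items
instance (items : List (List (String × String))) (out : List (String × List String)) : Decidable (Spec_get_keywords_by_region items out) := by unfold Spec_get_keywords_by_region; infer_instance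

-- ===== CLAIM (what is proved, stated in full; the proofs are below) =====
def Claim_equal_get_keywords_by_region : Prop := ∀ (items : List (List (String × String))), Dom_get_keywords_by_region items → Pre_get_keywords_by_region items → Spec_get_keywords_by_region items (get_keywords_by_region items)

-- ===== LEMMAS AND PROOFS =====

-- A dict with nodup keys is the list of (key, value-at-key) pairs, for any default.
theorem items_eq_map_keys_getD {κ ν : Type} [BEq κ] [LawfulBEq κ]
    (d : PySem.Dict κ ν) (dflt : ν) (h : d.keys.Nodup) :
    d.items = d.keys.map (fun k => (k, d.getD k dflt)) := by
  obtain ⟨l⟩ := d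
  induction l with
  | nil => rfl
  | cons p rest ih =>
    obtain ⟨k, v⟩ := p
    simp only [PySem.Dict.keys_mk, List.map_cons, List.nodup_cons, List.mem_map] at h
    obtain ⟨hk, hnd⟩ := h
    have hrest := ih (by simpa [PySem.Dict.keys_mk] using hnd)
    rw [PySem.Dict.keys_mk, List.map_cons]
    refine List.cons_eq_cons.mpr ⟨?_, ?_⟩
    · simp [PySem.Dict.getD, PySem.Dict.get?_mk_cons]
    · have hrest' : rest = List.map (fun k => (k, (PySem.Dict.mk rest).getD k dflt)) (List.map (fun x => x.1) rest) := by
        simpa [PySem.Dict.keys_mk] using hrest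
      conv_lhs => rw [hrest']
      apply List.map_congr_left
      intro x hx
      simp only [List.mem_map] at hx
      obtain ⟨q, hq, hqx⟩ := hx
      have hne : (k == x) = false := by
        refine beq_eq_false_iff_ne.mpr ?_
        intro hkx; exact hk ⟨q, hq, by rw [hqx, hkx]⟩
      simp [PySem.Dict.getD, PySem.Dict.get?_mk_cons, hne]

-- A's loop body is unconditionally a `modify` (on a missing key, modify inserts f [] = [keyword]).
theorem stepA_eq_modify (d : PySem.Dict String (List String)) (it : List (String × String)) :
    (let region := pvItemGet it "region"
     let keyword := pvItemGet it "keyword"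
     if d.contains region then d.modify region [] (fun l => l ++ [keyword])
     else d.insert region [keyword])
    = d.modify (pvItemGet it "region") [] (fun l => l ++ [pvItemGet it "keyword"]) := by
  by_cases h : d.contains (pvItemGet it "region") = true
  · simp [h]
  · simp only [Bool.not_eq_true] at h
    simp [h, PySem.Dict.modify, PySem.Dict.getD_of_not_contains _ _ h]

theorem ab_eq (items : List (List (String × String))) :
    get_keywords_by_region items = get_keywords_by_region_alt items := by
  unfold get_keywords_by_region get_keywords_by_region_alt
  have hstep : (fun (d : PySem.Dict String (List String)) it =>
      let region := pvItemGet it "region"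
      let keyword := pvItemGet it "keyword"
      if d.contains region then d.modify region [] (fun l => l ++ [keyword])
      else d.insert region [keyword])
    = fun d it => d.modify (pvItemGet it "region") [] (fun l => l ++ [pvItemGet it "keyword"]) :=
    funext fun d => funext fun it => stepA_eq_modify d it
  rw [hstep]
  have hD : items.foldl
        (fun d it => d.modify (pvItemGet it "region") [] (fun l => l ++ [pvItemGet it "keyword"]))
        PySem.Dict.empty
      = (items.map (fun it => (pvItemGet it "region", pvItemGet it "keyword"))).foldl
          (fun d p => d.modify p.1 [] (fun l => l ++ [p.2])) PySem.Dict.empty := by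
    rw [List.foldl_map]
  have hnodup := PySem.Dict.nodup_keys_foldl_modify_key items
      (fun it => pvItemGet it "region") ([] : List String)
      (fun _ it l => l ++ [pvItemGet it "keyword"]) PySem.Dict.empty
      (by simp [PySem.Dict.empty, PySem.Dict.keys_mk])
  have hkeys : (items.foldl
        (fun d it => d.modify (pvItemGet it "region") [] (fun l => l ++ [pvItemGet it "keyword"]))
        PySem.Dict.empty).keys
      = items.foldl (fun rs it => PySem.Set.add rs (pvItemGet it "region")) PySem.Set.empty := by
    rw [PySem.Dict.keys_foldl_modify_key items (fun it => pvItemGet it "region") ([] : List String)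
        (fun _ it l => l ++ [pvItemGet it "keyword"]) PySem.Dict.empty]
    simp [PySem.Set.update, List.foldl_map, PySem.Dict.empty, PySem.Dict.keys_mk, PySem.Set.empty]
  rw [items_eq_map_keys_getD _ ([] : List String) hnodup, hkeys]
  refine List.map_congr_left fun c _ => ?_
  rw [hD, PySem.Dict.getD_foldl_modify_append]
  simp [List.filter_map, Function.comp_def, PySem.Dict.getD_empty]

-- ===== VERDICT (by name: the statement is the Claim_ definition above) =====
theorem get_keywords_by_region_spec : Claim_equal_get_keywords_by_region := by
  intro items _ _
  unfold Spec_get_keywords_by_region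
  exact ab_eq items
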